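-- pv_equiv track=rewrite | github.com/Soorya-T/cyberguard | backend/app/pods/pod_b/signals/link_analyzer.py | is_url_shortener
-- ===== SOURCE A (Python) =====
-- def is_url_shortener(domain: str) -> bool:
--     """
--     Check if domain is a known URL shortener.
--
--     Args:
--         domain: Domain to check
--
--     Returns:
--         True if domain is a URL shortener
--     """
--     shorteners = {
--         "bit.ly", "goo.gl", "tinyurl.com", "t.co", "ow.ly",
--         "is.gd", "buff.ly", "adf.ly", "bl.ink", "short.link",
--         "rebrandly.com", "cutt.ly", "rb.gy", "shorturl.at",
--     }
--
--     domain_lower = domain.lower()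
--     return domain_lower in shorteners or any(
--         domain_lower.endswith(f".{s}") for s in shorteners
--     )
-- ===== SOURCE B (Python) =====
-- def is_url_shortener(domain: str) -> bool:
--     """
--     Check if domain is a known URL shortener.
--
--     Instead of scanning the shortener set testing endswith for each member,
--     chase the domain's dot-delimited suffixes with find('.'): look the current
--     suffix up in the set, and on a miss drop everything up to and including
--     the first dot, until no dot is left.
--     """
--     shorteners = {
--         "bit.ly", "goo.gl", "tinyurl.com", "t.co", "ow.ly",
--         "is.gd", "buff.ly", "adf.ly", "bl.ink", "short.link",
--         "rebrandly.com", "cutt.ly", "rb.gy", "shorturl.at",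
--     }
--
--     d = domain.lower()
--     while True:
--         if d in shorteners:
--             return True
--         i = d.find('.')
--         if i == -1:
--             return False
--         d = d[i + 1:]
-- ===== Notes on version B (the rewrite author's own statement) =====
-- stated objective: alternative
-- what changed: B replaces A's scan over the 14 set members testing endswith for each by a suffix-chasing loop: look the current suffix up in the set and on a miss use str.find to drop everything up to and including the first dot, until no dot remains.
import Mathlib
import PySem

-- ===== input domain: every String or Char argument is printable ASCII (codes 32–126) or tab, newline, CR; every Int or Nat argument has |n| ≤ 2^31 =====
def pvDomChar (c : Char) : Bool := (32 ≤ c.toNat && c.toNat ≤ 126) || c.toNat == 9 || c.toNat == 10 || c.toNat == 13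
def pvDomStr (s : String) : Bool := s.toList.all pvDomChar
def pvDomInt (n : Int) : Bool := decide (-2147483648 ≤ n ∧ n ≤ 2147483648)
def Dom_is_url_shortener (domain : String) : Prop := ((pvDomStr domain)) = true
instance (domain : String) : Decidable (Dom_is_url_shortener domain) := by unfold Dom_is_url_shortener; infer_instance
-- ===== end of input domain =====

-- B replaces A's scan over the set members calling endswith by a suffix-chasing loop:
-- look the current suffix up in the set and, on a miss, drop up to and past the first
-- dot (objective: alternative).

-- ===== PORT A =====
def shortenersA : PySem.Set String := PySem.Set.ofList
  ["bit.ly", "goo.gl", "tinyurl.com", "t.co", "ow.ly",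
   "is.gd", "buff.ly", "adf.ly", "bl.ink", "short.link",
   "rebrandly.com", "cutt.ly", "rb.gy", "shorturl.at"]

def is_url_shortener (domain : String) : Bool :=
  let domain_lower := PySem.Str.lower domain
  PySem.Set.contains shortenersA domain_lower ||
    shortenersA.any (fun s => PySem.Str.endswith domain_lower ("." ++ s))

-- ===== PORT B =====
def shortenersB : PySem.Set String := PySem.Set.ofList
  ["bit.ly", "goo.gl", "tinyurl.com", "t.co", "ow.ly",
   "is.gd", "buff.ly", "adf.ly", "bl.ink", "short.link",
   "rebrandly.com", "cutt.ly", "rb.gy", "shorturl.at"]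

-- the 'while True' loop of Source B, as structural recursion on the suffix it chases;
-- it only ever shortens the list, which is the termination measure.
def chaseB (d : List Char) : Bool :=
  if PySem.Set.contains shortenersB (String.ofList d) then true
  else
    let i := PySem.Chars.find d ['.']
    if h : i = -1 then false
    else
      have hlt : (d.drop (i.toNat + 1)).length < d.length := by
        have h0 : 0 ≤ PySem.Chars.find d ['.'] := by
          have := PySem.Chars.neg_one_le_find d ['.']
          omega
        have hs := (PySem.Chars.find_spec (s := d) (sub := ['.']) h0).1
        obtain ⟨u, hu⟩ := hs
        have : 0 < (d.drop (PySem.Chars.find d ['.']).toNat).length := by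
          rw [← hu]; simp
        simp only [List.length_drop] at this ⊢
        omega
      chaseB (d.drop (i.toNat + 1))
termination_by d.length

def is_url_shortener_alt (domain : String) : Bool :=
  chaseB (PySem.Str.lower domain).toList

-- ===== PRECONDITION & SPEC =====
def Spec_is_url_shortener (domain : String) (out : Bool) : Prop := out = is_url_shortener_alt domain
instance (domain : String) (out : Bool) : Decidable (Spec_is_url_shortener domain out) := by unfold Spec_is_url_shortener; infer_instance

-- ===== CLAIM (what is proved, stated in full; the proofs are below) =====
def Claim_equal_is_url_shortener : Prop := ∀ (domain : String), Dom_is_url_shortener domain → Spec_is_url_shortener domain (is_url_shortener domain)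

-- ===== LEMMAS AND PROOFS =====

-- the common characterisation both programs compute
def DotHit (l : List Char) : Prop :=
  PySem.Set.contains shortenersA (String.ofList l) = true ∨
    ∃ t, ('.' :: t) <:+ l ∧ PySem.Set.contains shortenersA (String.ofList t) = true

-- '.'-headed suffixes of l are exactly the tails after a dot character.
theorem dot_suffix_iff (l t : List Char) :
    ('.' :: t) <:+ l ↔ ∃ k : Nat, k < l.length ∧ l[k]? = some '.' ∧ l.drop (k + 1) = t := by
  constructor
  · rintro ⟨pre, rfl⟩
    refine ⟨pre.length, by simp, ?_, ?_⟩
    · simp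
    · simp [List.drop_append]
  · rintro ⟨k, hk, hget, hdrop⟩
    refine ⟨l.take k, ?_⟩
    have : l.take (k + 1) = l.take k ++ ['.'] := by
      rw [List.take_add_one, hget]; rfl
    calc l.take k ++ '.' :: t = (l.take k ++ ['.']) ++ t := by simp
      _ = l.take (k + 1) ++ l.drop (k + 1) := by rw [this, hdrop]
      _ = l := List.take_append_drop _ _

-- splitting the dot suffixes of l at its FIRST dot (index n)
theorem dot_suffix_first (l : List Char) (n : Nat)
    (hn : l[n]? = some '.') (hmin : ∀ k < n, l[k]? ≠ some '.') (t : List Char) :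
    ('.' :: t) <:+ l ↔ t = l.drop (n + 1) ∨ ('.' :: t) <:+ l.drop (n + 1) := by
  have hnlen : n < l.length := by
    by_contra h
    rw [List.getElem?_eq_none (by omega)] at hn
    exact absurd hn (by simp)
  constructor
  · rw [dot_suffix_iff]
    rintro ⟨k, hk, hget, hdrop⟩
    rcases lt_trichotomy k n with h | h | h
    · exact absurd hget (hmin k h)
    · subst h; exact Or.inl hdrop.symm
    · refine Or.inr ((dot_suffix_iff _ _).2 ⟨k - n - 1, ?_, ?_, ?_⟩)
      · simp only [List.length_drop]; omega
      · rw [List.getElem?_drop]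
        rw [show n + 1 + (k - n - 1) = k by omega]
        exact hget
      · rw [List.drop_drop]
        rw [show n + 1 + (k - n - 1 + 1) = k + 1 by omega]
        exact hdrop
  · rintro (rfl | h)
    · exact (dot_suffix_iff _ _).2 ⟨n, hnlen, hn, rfl⟩
    · rw [dot_suffix_iff] at h ⊢
      obtain ⟨k, hk, hget, hdrop⟩ := h
      refine ⟨n + 1 + k, ?_, ?_, ?_⟩
      · simp only [List.length_drop] at hk; omega
      · rw [← List.getElem?_drop]; exact hget
      · rw [← hdrop, List.drop_drop]
        congr 1

-- a dot-headed suffix forces a dot to be findable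
theorem dot_suffix_infix {l t : List Char} (h : ('.' :: t) <:+ l) :
    ['.'] <:+: l :=
  List.IsInfix.trans (List.infix_iff_prefix_suffix.2 ⟨'.' :: t, ⟨t, rfl⟩, List.suffix_refl _⟩) h.isInfix

-- the B loop computes exactly DotHit
theorem chaseB_iff (d : List Char) : chaseB d = true ↔ DotHit d := by
  induction d using chaseB.induct with
  | case1 d hc =>
    rw [chaseB]
    simp only [hc, if_true, true_iff]
    exact Or.inl hc
  | case2 d hc i hi =>
    have hieq : i = PySem.Chars.find d ['.'] := rfl
    rw [hieq] at hi
    rw [chaseB, if_neg hc, dif_pos hi]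
    simp only [Bool.false_eq_true, false_iff]
    rintro (h | ⟨t, hsuf, hmem⟩)
    · exact hc h
    · exact absurd (dot_suffix_infix hsuf)
        ((PySem.Chars.find_eq_neg_one_iff d ['.']).1 hi)
  | case3 d hc i hi hlt ih =>
    have hieq : i = PySem.Chars.find d ['.'] := rfl
    rw [hieq] at hi ih
    rw [chaseB, if_neg hc, dif_neg hi]
    rw [ih]
    -- the first dot sits at index (find d ['.']).toNat
    have h0 : 0 ≤ PySem.Chars.find d ['.'] := by
      have := PySem.Chars.neg_one_le_find d ['.']
      omega
    obtain ⟨hpre, hmn⟩ := PySem.Chars.find_spec (s := d) (sub := ['.']) h0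
    set n := (PySem.Chars.find d ['.']).toNat with hn
    have hgetn : d[n]? = some '.' := by
      obtain ⟨u, hu⟩ := hpre
      have : (d.drop n)[0]? = some '.' := by rw [← hu]; rfl
      rwa [List.getElem?_drop, Nat.add_zero] at this
    have hminn : ∀ k < n, d[k]? ≠ some '.' := by
      intro k hk hdot
      refine hmn k hk ⟨(d.drop k).tail, ?_⟩
      have hklen : k < d.length := by
        by_contra hh
        rw [List.getElem?_eq_none (by omega)] at hdot
        exact absurd hdot (by simp)
      have : d.drop k = '.' :: (d.drop k).tail := by
        rw [List.drop_eq_getElem_cons hklen]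
        rw [List.getElem?_eq_getElem hklen] at hdot
        simp only [Option.some.injEq] at hdot
        rw [hdot]; rfl
      simpa using this.symm
    constructor
    · intro h
      refine Or.inr ?_
      rcases h with h | ⟨t, hsuf, hmem⟩
      · exact ⟨d.drop (n + 1), (dot_suffix_first d n hgetn hminn _).2 (Or.inl rfl), h⟩
      · exact ⟨t, (dot_suffix_first d n hgetn hminn t).2 (Or.inr hsuf), hmem⟩
    · rintro (h | ⟨t, hsuf, hmem⟩)
      · exact absurd h hc
      · rcases (dot_suffix_first d n hgetn hminn t).1 hsuf with rfl | h
        · exact Or.inl hmem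
        · exact Or.inr ⟨t, h, hmem⟩

-- the A expression computes exactly DotHit as well
theorem portA_iff (domain : String) :
    is_url_shortener domain = true ↔ DotHit (PySem.Str.lower domain).toList := by
  unfold is_url_shortener DotHit
  simp only [Bool.or_eq_true]
  constructor
  · rintro (h | h)
    · exact Or.inl (by rwa [String.ofList_toList])
    · rw [List.any_eq_true] at h
      obtain ⟨s, hs, hend⟩ := h
      refine Or.inr ⟨s.toList, ?_, ?_⟩
      · rw [PySem.Str.endswith_eq, PySem.Chars.endswith_iff] at hend
        rwa [show ("." ++ s).toList = '.' :: s.toList by simp] at hend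
      · rw [String.ofList_toList, PySem.Set.contains_iff]
        exact hs
  · rintro (h | ⟨t, hsuf, hmem⟩)
    · exact Or.inl (by rwa [String.ofList_toList] at h)
    · refine Or.inr ?_
      rw [List.any_eq_true]
      refine ⟨String.ofList t, (PySem.Set.contains_iff ..).1 hmem, ?_⟩
      rw [PySem.Str.endswith_eq, PySem.Chars.endswith_iff]
      rw [show ("." ++ String.ofList t).toList = '.' :: t by simp]
      exact hsuf

-- ===== VERDICT (by name: the statement is the Claim_ definition above) =====
theorem is_url_shortener_spec : Claim_equal_is_url_shortener := by
  intro domain _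
  unfold Spec_is_url_shortener is_url_shortener_alt
  rw [Bool.eq_iff_iff, portA_iff, chaseB_iff]
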